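-- pv_equiv track=rewrite | github.com/tylerharter/caraza-harter-com | tyler/cs301/fall18/compile.py | format_day
-- ===== SOURCE A (Python) =====
-- def format_day(day):
--     lines = day.split('\n')
--     out = []
--     for i,line in enumerate(lines):
--         if line.startswith('*'):
--             if i==0 or not lines[i-1].startswith('*'):
--                 out.append('<ul class="compact-ul">')
--             out.append('<li>'+line[1:])
--             if i==len(lines)-1 or not lines[i+1].startswith('*'):
--                 out.append('</ul>')
--         else:
--             out.append(line)
--     return '\n'.join(out)
-- ===== SOURCE B (Python) =====
-- def format_day(day):
--     out = []
--     in_list = False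
--     for line in day.split('\n'):
--         if line.startswith('*'):
--             if not in_list:
--                 out.append('<ul class="compact-ul">')
--                 in_list = True
--             out.append('<li>' + line[1:])
--         else:
--             if in_list:
--                 out.append('</ul>')
--                 in_list = False
--             out.append(line)
--     if in_list:
--         out.append('</ul>')
--     return '\n'.join(out)
-- ===== Notes on version B (the rewrite author's own statement) =====
-- stated objective: idiomatic
-- what changed: Replaces A's neighbor-index peeking (lines[i-1]/lines[i+1] lookups via enumerate) with a single state-machine pass maintaining an in_list flag, closing the list lazily and after the loop.
import Mathlib
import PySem

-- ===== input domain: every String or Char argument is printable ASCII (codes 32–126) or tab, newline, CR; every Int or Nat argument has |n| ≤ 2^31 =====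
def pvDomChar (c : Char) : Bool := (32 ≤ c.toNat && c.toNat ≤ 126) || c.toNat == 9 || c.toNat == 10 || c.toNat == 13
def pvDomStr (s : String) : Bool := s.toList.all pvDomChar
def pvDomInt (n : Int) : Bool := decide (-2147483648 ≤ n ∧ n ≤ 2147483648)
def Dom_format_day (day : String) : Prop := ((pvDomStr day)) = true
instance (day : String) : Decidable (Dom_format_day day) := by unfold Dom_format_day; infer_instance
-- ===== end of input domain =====

-- B replaces A's neighbor-index peeking (enumerate + lines[i-1]/lines[i+1]) with a
-- state-machine pass carrying an in_list flag (objective: idiomatic; same O(n) cost).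

-- ===== PORT A =====
-- the for-loop over enumerate(lines), with out the accumulator and i the running index;
-- lines[i-1]/lines[i+1] are the guarded lookups (guards make getD exact)
def formatDayGo (lines : List String) : Nat → List String → List String → List String
  | _, [], out => out
  | i, line :: todo, out =>
    let out :=
      if PySem.Str.startswith line "*" then
        let out :=
          if i = 0 ∨ ¬ (PySem.Str.startswith (lines.getD (i - 1) "") "*") then
            out ++ ["<ul class=\"compact-ul\">"]
          else out
        let out := out ++ ["<li>" ++ PySem.Str.slice line (some 1) none]
        if i = lines.length - 1 ∨ ¬ (PySem.Str.startswith (lines.getD (i + 1) "") "*") then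
          out ++ ["</ul>"]
        else out
      else out ++ [line]
    formatDayGo lines (i + 1) todo out

def format_day (day : String) : String :=
  let lines := (PySem.Str.split? day "\n").getD []   -- sep ≠ "" so split? is always some
  PySem.Str.join "\n" (formatDayGo lines 0 lines [])

-- ===== PORT B =====
-- one step of Source B's loop: state (out, in_list)
def formatDayStep (st : List String × Bool) (line : String) : List String × Bool :=
  if PySem.Str.startswith line "*" then
    let st := if ¬ st.2 then (st.1 ++ ["<ul class=\"compact-ul\">"], true) else st
    (st.1 ++ ["<li>" ++ PySem.Str.slice line (some 1) none], st.2)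
  else
    let st := if st.2 then (st.1 ++ ["</ul>"], false) else st
    (st.1 ++ [line], st.2)

def format_day_alt (day : String) : String :=
  let lines := (PySem.Str.split? day "\n").getD []
  let st := lines.foldl formatDayStep ([], false)
  PySem.Str.join "\n" (if st.2 then st.1 ++ ["</ul>"] else st.1)

-- ===== PRECONDITION & SPEC =====
def Spec_format_day (day : String) (out : String) : Prop := out = format_day_alt day
instance (day : String) (out : String) : Decidable (Spec_format_day day out) := by unfold Spec_format_day; infer_instance

-- ===== CLAIM (what is proved, stated in full; the proofs are below) =====
def Claim_equal_format_day : Prop := ∀ (day : String), Dom_format_day day → Spec_format_day day (format_day day)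

-- ===== LEMMAS AND PROOFS =====

/-- Whether the head of the remaining lines starts with '*' (false for the empty list). -/
def headStar (todo : List String) : Bool :=
  PySem.Str.startswith (todo.headD "") "*"

lemma headStar_nil : headStar [] = false := by
  simp [headStar, PySem.Str.startswith, PySem.Chars.startswith]

/-- Loop invariant: A's accumulator equals B's, except that when the previous line was a
bullet and the next line is not, A has already emitted the pending `</ul>`. -/
lemma go_eq (lines : List String) :
    ∀ (todo : List String) (i : Nat) (outB : List String) (flag : Bool),
      todo = lines.drop i →
      (flag = true ↔ (i ≠ 0 ∧ PySem.Str.startswith (lines.getD (i - 1) "") "*" = true)) →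
      formatDayGo lines i todo
          (outB ++ (if flag ∧ headStar todo = false then ["</ul>"] else [])) =
        (let st := todo.foldl formatDayStep (outB, flag)
         if st.2 then st.1 ++ ["</ul>"] else st.1) := by
  intro todo
  induction todo with
  | nil =>
    intro i outB flag _ _
    cases flag <;> simp [formatDayGo, headStar_nil]
  | cons line todo ih =>
    intro i outB flag hdrop hflag
    have hget : lines[i]? = some line := by
      have h0 : (lines.drop i)[0]? = some line := by rw [← hdrop]; rfl
      rw [List.getElem?_drop] at h0
      simpa using h0
    have hgetD : lines.getD i "" = line := by
      show (lines[i]?).getD "" = line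
      rw [hget]
      rfl
    have hdrop' : todo = lines.drop (i + 1) := by
      have := congrArg List.tail hdrop
      simpa [List.tail_drop] using this
    have hlt : i < lines.length := by
      by_contra h
      simp [List.getElem?_eq_none (by omega : lines.length ≤ i)] at hget
    have hclose : (i = lines.length - 1 ∨
          ¬ (PySem.Str.startswith (lines.getD (i + 1) "") "*" = true)) ↔
        headStar todo = false := by
      cases htodo : todo with
      | nil =>
        have hlen : lines.length = i + 1 := by
          have h1 : lines.drop (i + 1) = [] := by rw [← hdrop', htodo]
          have := List.drop_eq_nil_iff.mp h1
          omega
        simp [headStar_nil, hlen]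
      | cons l' rest =>
        have hget1 : lines[i+1]? = some l' := by
          have h0 : (lines.drop (i+1))[0]? = some l' := by rw [← hdrop', htodo]; rfl
          rw [List.getElem?_drop] at h0
          simpa using h0
        have hlt1 : i + 1 < lines.length := by
          by_contra h
          simp [List.getElem?_eq_none (by omega : lines.length ≤ i + 1)] at hget1
        have hne : ¬ i = lines.length - 1 := by omega
        have hgetD1 : lines.getD (i + 1) "" = l' := by
          show (lines[i+1]?).getD "" = l'
          rw [hget1]
          rfl
        rw [hgetD1]
        simp [headStar, hne]
    have hstarC : PySem.Chars.startswith line.toList ['*'] =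
        PySem.Str.startswith line "*" := by simp [PySem.Str.startswith]
    by_cases hstar : PySem.Str.startswith line "*" = true
    · have hstarC2 : PySem.Chars.startswith line.toList ['*'] = true := hstarC.trans hstar
      -- bullet line: headStar (line :: todo) = true, so no pending close on entry
      have hhead : headStar (line :: todo) = true := by
        simp only [headStar, List.headD_cons]
        exact hstar
      have hnewflag : (true = true) ↔
          (i + 1 ≠ 0 ∧ PySem.Str.startswith (lines.getD (i + 1 - 1) "") "*" = true) := by
        rw [Nat.add_sub_cancel, hgetD]
        exact ⟨fun _ => ⟨Nat.succ_ne_zero i, hstar⟩, fun _ => rfl⟩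
      have hopen : (i = 0 ∨ ¬ (PySem.Str.startswith (lines.getD (i - 1) "") "*" = true)) ↔
          flag = false := by
        constructor
        · intro h
          cases hf : flag
          · rfl
          · rcases hflag.mp hf with ⟨h0, hp⟩
            rcases h with h | h
            · exact absurd h h0
            · exact absurd hp h
        · intro hf
          by_cases h0 : i = 0
          · exact Or.inl h0
          · refine Or.inr fun hp => ?_
            have := hflag.mpr ⟨h0, hp⟩
            rw [hf] at this
            exact absurd this (by simp)
      rw [formatDayGo]
      cases hf : flag
      · -- list not open: both A and B emit the opening tag
        have hop := hopen.mpr hf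
        cases hcl : headStar todo
        · -- run ends after this line: A closes now, B closes on a later step
          have hc2 := hclose.mpr hcl
          have hih := ih (i + 1)
            ((outB ++ ["<ul class=\"compact-ul\">"]) ++
              ["<li>" ++ PySem.Str.slice line (some 1) none]) true hdrop' hnewflag
          simp at hop hc2
          simp [formatDayStep, hhead, hcl, hstarC2, hop, hc2] at hih ⊢
          exact hih
        · -- next line is a bullet too: A does not close yet
          have hc2 : ¬ (i = lines.length - 1 ∨
              ¬ (PySem.Str.startswith (lines.getD (i + 1) "") "*" = true)) := by
            intro h
            have := hclose.mp h
            rw [hcl] at this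
            exact absurd this (by simp)
          have hih := ih (i + 1)
            ((outB ++ ["<ul class=\"compact-ul\">"]) ++
              ["<li>" ++ PySem.Str.slice line (some 1) none]) true hdrop' hnewflag
          simp at hop hc2
          simp [formatDayStep, hhead, hcl, hstarC2, hop, hc2] at hih ⊢
          exact hih
      · -- list already open: neither emits the opening tag
        have hop : ¬ (i = 0 ∨ ¬ (PySem.Str.startswith (lines.getD (i - 1) "") "*" = true)) := by
          intro h
          have := hopen.mp h
          rw [hf] at this
          exact absurd this (by simp)
        cases hcl : headStar todo
        · have hc2 := hclose.mpr hcl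
          have hih := ih (i + 1)
            (outB ++ ["<li>" ++ PySem.Str.slice line (some 1) none]) true hdrop' hnewflag
          simp at hop hc2
          simp [formatDayStep, hhead, hcl, hstarC2, hop, hc2] at hih ⊢
          exact hih
        · have hc2 : ¬ (i = lines.length - 1 ∨
              ¬ (PySem.Str.startswith (lines.getD (i + 1) "") "*" = true)) := by
            intro h
            have := hclose.mp h
            rw [hcl] at this
            exact absurd this (by simp)
          have hih := ih (i + 1)
            (outB ++ ["<li>" ++ PySem.Str.slice line (some 1) none]) true hdrop' hnewflag
          simp at hop hc2
          simp [formatDayStep, hhead, hcl, hstarC2, hop, hc2] at hih ⊢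
          exact hih
    · -- plain line: any pending close has already been emitted by A on the previous step
      have hhead : headStar (line :: todo) = false := by
        simp only [headStar, List.headD_cons]
        exact Bool.eq_false_iff.mpr hstar
      have hnewflag : (false = true) ↔
          (i + 1 ≠ 0 ∧ PySem.Str.startswith (lines.getD (i + 1 - 1) "") "*" = true) := by
        rw [Nat.add_sub_cancel, hgetD]
        exact ⟨fun h => absurd h (by simp), fun h => absurd h.2 hstar⟩
      have hstarC2 : PySem.Chars.startswith line.toList ['*'] = false :=
        hstarC.trans (Bool.eq_false_iff.mpr hstar)
      rw [formatDayGo]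
      cases hf : flag
      · have hih := ih (i + 1) (outB ++ [line]) false hdrop' hnewflag
        simp [formatDayStep, hhead, hstarC2] at hih ⊢
        exact hih
      · have hih := ih (i + 1) ((outB ++ ["</ul>"]) ++ [line]) false hdrop' hnewflag
        simp [formatDayStep, hhead, hstarC2] at hih ⊢
        exact hih

-- ===== VERDICT (by name: the statement is the Claim_ definition above) =====
theorem format_day_spec : Claim_equal_format_day := by
  intro day _
  unfold Spec_format_day format_day format_day_alt
  have h := go_eq ((PySem.Str.split? day "\n").getD []) ((PySem.Str.split? day "\n").getD [])
      0 [] false (by simp) (by simp)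
  exact congrArg (PySem.Str.join "\n") h
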